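-- pv_equiv track=rewrite | github.com/MedhatHassan/CyberTalents | Cryptography/Ziggy/decoder.py | t9_decode
-- ===== SOURCE A (Python) =====
-- def t9_decode(ct):
--     # Mapping from T9 to corresponding letters
--     t9_map = {
--         '2': 'A', '22': 'B', '222': 'C',  # 2 maps to ABC
--         '3': 'D', '33': 'E', '333': 'F',  # 3 maps to DEF
--         '4': 'G', '44': 'H', '444': 'I',  # 4 maps to GHI
--         '5': 'J', '55': 'K', '555': 'L',  # 5 maps to JKL
--         '6': 'M', '66': 'N', '666': 'O',  # 6 maps to MNO
--         '7': 'P', '77': 'Q', '777': 'R', '7777': 'S',  # 7 maps to PQRS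
--         '8': 'T', '88': 'U', '888': 'V',  # 8 maps to TUV
--         '9': 'W', '99': 'X', '999': 'Y', '9999': 'Z'  # 9 maps to WXYZ
--     }
--
--     ct_list = ct.split(' ')
--
--     decoded_message = []
--
--     for code in ct_list:
--         if code in t9_map:
--             decoded_message.append(t9_map[code])
--         else:
--             decoded_message.append('?')
--
--
--     return ''.join(decoded_message)
-- ===== SOURCE B (Python) =====
-- def t9_decode(ct):
--     # Decode each token by computation from per-digit alphabet groups
--     # instead of a 30-entry lookup table.
--     groups = {'2': 'ABC', '3': 'DEF', '4': 'GHI', '5': 'JKL',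
--               '6': 'MNO', '7': 'PQRS', '8': 'TUV', '9': 'WXYZ'}
--
--     def letter(tok):
--         g = groups.get(tok[:1])
--         if g is not None and all(ch == tok[0] for ch in tok) and len(tok) <= len(g):
--             return g[len(tok) - 1]
--         return '?'
--
--     return ''.join(letter(tok) for tok in ct.split(' '))
-- ===== Notes on version B (the rewrite author's own statement) =====
-- stated objective: idiomatic
-- what changed: Replaces A's hard-coded 30-entry T9 code-to-letter table by computing each token's letter from 8 per-digit alphabet groups: a valid token is a run of one digit key and its letter is groups[digit][len(token)-1].
import Mathlib
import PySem

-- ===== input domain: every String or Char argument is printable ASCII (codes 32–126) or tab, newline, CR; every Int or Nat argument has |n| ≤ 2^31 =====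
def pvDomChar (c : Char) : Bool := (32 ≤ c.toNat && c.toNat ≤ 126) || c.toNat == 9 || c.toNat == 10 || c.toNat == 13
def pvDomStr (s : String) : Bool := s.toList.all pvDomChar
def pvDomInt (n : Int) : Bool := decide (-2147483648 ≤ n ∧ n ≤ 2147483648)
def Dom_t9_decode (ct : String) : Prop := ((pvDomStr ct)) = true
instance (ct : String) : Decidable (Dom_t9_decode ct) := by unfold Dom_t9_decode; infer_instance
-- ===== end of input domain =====

-- B replaces A's 30-entry T9 lookup table by computing each letter from 8 per-digit
-- alphabet groups (token = a run of one digit, letter = group[len-1]); objective: idiomatic.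

-- ===== PORT A =====
def t9Map : PySem.Dict String String :=
  PySem.Dict.ofList [("2","A"),("22","B"),("222","C"),
    ("3","D"),("33","E"),("333","F"),
    ("4","G"),("44","H"),("444","I"),
    ("5","J"),("55","K"),("555","L"),
    ("6","M"),("66","N"),("666","O"),
    ("7","P"),("77","Q"),("777","R"),("7777","S"),
    ("8","T"),("88","U"),("888","V"),
    ("9","W"),("99","X"),("999","Y"),("9999","Z")]

def t9_decode (ct : String) : String :=
  let ctList := (PySem.Str.split? ct " ").getD []          -- ct.split(' '); " " ≠ "" so split? is some
  let decoded := ctList.foldl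
    (fun acc code =>
      if t9Map.contains code then acc ++ [t9Map.getD code "?"]   -- getD: under the contains guard = t9_map[code]
      else acc ++ ["?"]) []
  PySem.Str.join "" decoded

-- ===== PORT B =====
def t9Groups : PySem.Dict String String :=
  PySem.Dict.ofList [("2","ABC"),("3","DEF"),("4","GHI"),("5","JKL"),
    ("6","MNO"),("7","PQRS"),("8","TUV"),("9","WXYZ")]

-- Source B's letter(tok); tok[:1] = toList.take 1, tok[0] = headD (only reached when tok ≠ ""),
-- len(tok) ≤ len(g) guard makes g[len(tok)-1] in range, so getD is exact there
def t9Letter (tok : String) : String :=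
  match t9Groups.get? (String.ofList (tok.toList.take 1)) with
  | none => "?"
  | some g =>
    if tok.toList.all (fun ch => ch == tok.toList.headD '?') && tok.toList.length ≤ g.toList.length
    then String.ofList [g.toList.getD (tok.toList.length - 1) '?']
    else "?"

def t9_decode_alt (ct : String) : String :=
  PySem.Str.join "" (((PySem.Str.split? ct " ").getD []).map t9Letter)

-- ===== PRECONDITION & SPEC =====
def Spec_t9_decode (ct : String) (out : String) : Prop := out = t9_decode_alt ct
instance (ct : String) (out : String) : Decidable (Spec_t9_decode ct out) := by unfold Spec_t9_decode; infer_instance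

-- ===== CLAIM (what is proved, stated in full; the proofs are below) =====
def Claim_equal_t9_decode : Prop := ∀ (ct : String), Dom_t9_decode ct → Spec_t9_decode ct (t9_decode ct)

-- ===== LEMMAS AND PROOFS =====

-- A's per-token value, abbreviated
def decA (tok : String) : String :=
  if t9Map.contains tok then t9Map.getD tok "?" else "?"

lemma decA_eq (tok : String) : decA tok = (t9Map.get? tok).getD "?" := by
  unfold decA
  rw [PySem.Dict.contains_eq_isSome_get?, PySem.Dict.getD_eq_get?_getD]
  cases t9Map.get? tok <;> simp

lemma str_beq (s t : String) : (s == t) = (s.toList == t.toList) := by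
  rw [Bool.eq_iff_iff]; simp [String.toList_inj]

lemma t9Map_mk : t9Map = PySem.Dict.mk [("2","A"),("22","B"),("222","C"),
    ("3","D"),("33","E"),("333","F"),
    ("4","G"),("44","H"),("444","I"),
    ("5","J"),("55","K"),("555","L"),
    ("6","M"),("66","N"),("666","O"),
    ("7","P"),("77","Q"),("777","R"),("7777","S"),
    ("8","T"),("88","U"),("888","V"),
    ("9","W"),("99","X"),("999","Y"),("9999","Z")] := by decide

lemma t9Groups_mk : t9Groups = PySem.Dict.mk [("2","ABC"),("3","DEF"),("4","GHI"),("5","JKL"),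
    ("6","MNO"),("7","PQRS"),("8","TUV"),("9","WXYZ")] := by decide

lemma get?_mk_nil (s : String) :
    (PySem.Dict.mk ([] : List (String × String))).get? s = none := rfl

set_option maxHeartbeats 1000000 in
lemma tok_eq_list (c : Char) (rest : List Char) :
    decA (String.ofList (c :: rest)) = t9Letter (String.ofList (c :: rest)) := by
  rw [decA_eq]
  rcases rest with _|⟨x, _|⟨y, _|⟨z, _|⟨w, r⟩⟩⟩⟩ <;>
  · simp only [t9Letter, t9Map_mk, t9Groups_mk, String.toList_ofList, List.take,
      show ("2":String).toList = ['2'] from rfl, show ("22":String).toList = ['2', '2'] from rfl, show ("222":String).toList = ['2', '2', '2'] from rfl, show ("3":String).toList = ['3'] from rfl, show ("33":String).toList = ['3', '3'] from rfl, show ("333":String).toList = ['3', '3', '3'] from rfl, show ("4":String).toList = ['4'] from rfl, show ("44":String).toList = ['4', '4'] from rfl, show ("444":String).toList = ['4', '4', '4'] from rfl, show ("5":String).toList = ['5'] from rfl, show ("55":String).toList = ['5', '5'] from rfl, show ("555":String).toList = ['5', '5', '5'] from rfl, show ("6":String).toList = ['6'] from rfl, show ("66":String).toList = ['6', '6'] from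 rfl, show ("666":String).toList = ['6', '6', '6'] from rfl, show ("7":String).toList = ['7'] from rfl, show ("77":String).toList = ['7', '7'] from rfl, show ("777":String).toList = ['7', '7', '7'] from rfl, show ("7777":String).toList = ['7', '7', '7', '7'] from rfl, show ("8":String).toList = ['8'] from rfl, show ("88":String).toList = ['8', '8'] from rfl, show ("888":String).toList = ['8', '8', '8'] from rfl, show ("9":String).toList = ['9'] from rfl, show ("99":String).toList = ['9', '9'] from rfl, show ("999":String).toList = ['9', '9', '9'] from rfl, show ("9999":String).toList = ['9', '9', '9', '9'] from rfl, List.cons.injEq, List.all_cons, List.all_nil, List.headD_cons,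
      List.length_cons, List.length_nil,
      PySem.Dict.get?_mk_cons, str_beq, beq_iff_eq]
    by_cases h2 : ('2':Char) = c
    · subst h2; simp [get?_mk_nil] <;> try (split_ifs <;> simp_all [eq_comm])
    ·
      by_cases h3 : ('3':Char) = c
      · subst h3; simp [get?_mk_nil] <;> try (split_ifs <;> simp_all [eq_comm])
      ·
        by_cases h4 : ('4':Char) = c
        · subst h4; simp [get?_mk_nil] <;> try (split_ifs <;> simp_all [eq_comm])
        ·
          by_cases h5 : ('5':Char) = c
          · subst h5; simp [get?_mk_nil] <;> try (split_ifs <;> simp_all [eq_comm])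
          ·
            by_cases h6 : ('6':Char) = c
            · subst h6; simp [get?_mk_nil] <;> try (split_ifs <;> simp_all [eq_comm])
            ·
              by_cases h7 : ('7':Char) = c
              · subst h7; simp [get?_mk_nil] <;> try (split_ifs <;> simp_all [eq_comm])
              ·
                by_cases h8 : ('8':Char) = c
                · subst h8; simp [get?_mk_nil] <;> try (split_ifs <;> simp_all [eq_comm])
                ·
                  by_cases h9 : ('9':Char) = c
                  · subst h9; simp [get?_mk_nil] <;> try (split_ifs <;> simp_all [eq_comm])
                  · simp [h2, h3, h4, h5, h6, h7, h8, h9, get?_mk_nil]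

lemma tok_eq (tok : String) : decA tok = t9Letter tok := by
  rcases h : tok.toList with _|⟨c, rest⟩
  · have htok : tok = "" := by
      rw [← String.ofList_toList (s := tok), h]
    subst htok; decide
  · have htok : tok = String.ofList (c :: rest) := by
      rw [← String.ofList_toList (s := tok), h]
    rw [htok, tok_eq_list]

lemma foldl_decA (l : List String) (acc : List String) :
    l.foldl (fun acc code =>
      if t9Map.contains code then acc ++ [t9Map.getD code "?"] else acc ++ ["?"]) acc
      = acc ++ l.map decA := by
  induction l generalizing acc with
  | nil => simp
  | cons hd tl ih =>
    have hhd : (if t9Map.contains hd then acc ++ [t9Map.getD hd "?"] else acc ++ ["?"])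
        = acc ++ [decA hd] := by unfold decA; split <;> rfl
    simp only [List.foldl_cons, hhd, ih, List.map_cons, List.append_assoc,
      List.singleton_append]

-- ===== VERDICT (by name: the statement is the Claim_ definition above) =====
theorem t9_decode_spec : Claim_equal_t9_decode := by
  intro ct _
  show t9_decode ct = t9_decode_alt ct
  unfold t9_decode t9_decode_alt
  simp only []
  rw [foldl_decA, List.nil_append]
  exact congrArg (PySem.Str.join "") (List.map_congr_left fun tok _ => tok_eq tok)
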